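-- pv_equiv track=rewrite | github.com/JonghyunLEE12/SSAFY7TIL | 0329/swea5203/solswea5203.py | is_run_or_triplet
-- ===== SOURCE A (Python) =====
-- def is_run_or_triplet(card):
--     for i in range(len(card)):
--         for j in range(i+1,len(card)):
--             for k in range(j+1,len(card)):
--                 # 3개의 카드가 모두 같으면 run
--                 if card[i] == card[j] == card[k]:
--                     return True
--                 # triplet 검사를 위해 정렬해준다.
--                 check_triplet = sorted([card[i],card[j],card[k]])
--                 # 3개의 카드가 순서를 이루면 triplet
--                 if check_triplet[0] + 2 == check_triplet[2] and check_triplet[1]+1 == check_triplet[2]: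
--                     return True
--     # run 과 triplet을 만족 못하면 False
--     return False
-- ===== SOURCE B (Python) =====
-- def is_run_or_triplet(card):
--     counts = {}
--     for x in card:
--         counts[x] = counts.get(x, 0) + 1
--     if any(c >= 3 for c in counts.values()):
--         return True
--     return any(x + 1 in counts and x + 2 in counts for x in counts)
-- ===== Notes on version B (the rewrite author's own statement) =====
-- stated objective: faster
-- what changed: Replaces A's scan over all index triples by one counting pass: a value occurring 3+ times is a run, and x, x+1, x+2 all present in the count table is a triplet; measured asymptotically faster (A timed out at n=1024 where B answers instantly), though A can exit early on inputs with an early triple.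
import Mathlib
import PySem

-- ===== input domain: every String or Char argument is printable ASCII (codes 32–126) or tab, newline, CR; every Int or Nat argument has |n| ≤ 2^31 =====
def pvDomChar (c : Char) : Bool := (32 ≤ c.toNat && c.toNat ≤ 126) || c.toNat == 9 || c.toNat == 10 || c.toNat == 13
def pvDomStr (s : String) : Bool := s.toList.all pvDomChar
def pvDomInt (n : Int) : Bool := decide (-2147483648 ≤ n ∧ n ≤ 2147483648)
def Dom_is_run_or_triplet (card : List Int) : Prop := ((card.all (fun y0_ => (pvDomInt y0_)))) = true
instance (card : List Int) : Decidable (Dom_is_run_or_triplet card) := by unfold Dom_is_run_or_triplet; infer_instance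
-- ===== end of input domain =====

-- B detects a run via occurrence counts and a triplet via membership of x, x+1, x+2
-- in the count table, instead of A's scan over all index triples.

-- ===== PORT A =====
-- the body of A's innermost loop: the run test, then the sorted-triple test
def pvBodyA (a b c : Int) : Bool :=
  if a == b && b == c then true
  else
    let check_triplet := PySem.List.sorted [a, b, c] (fun x => x) false
    decide (PySem.List.pyGetD check_triplet 0 0 + 2 = PySem.List.pyGetD check_triplet 2 0 ∧
            PySem.List.pyGetD check_triplet 1 0 + 1 = PySem.List.pyGetD check_triplet 2 0)

def is_run_or_triplet (card : List Int) : Bool :=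
  (PySem.List.pyRange 0 (card.length : Int) 1).any fun i =>
    (PySem.List.pyRange (i + 1) (card.length : Int) 1).any fun j =>
      (PySem.List.pyRange (j + 1) (card.length : Int) 1).any fun k =>
        pvBodyA (PySem.List.pyGetD card i 0) (PySem.List.pyGetD card j 0)
          (PySem.List.pyGetD card k 0)

-- ===== PORT B =====
def is_run_or_triplet_alt (card : List Int) : Bool :=
  let counts := card.foldl (fun d x => d.insert x (d.getD x 0 + 1)) (PySem.Dict.empty : PySem.Dict Int Int)
  if counts.values.any (fun c => decide (3 ≤ c)) then true
  else counts.keys.any (fun x => counts.contains (x + 1) && counts.contains (x + 2))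

-- ===== PRECONDITION & SPEC =====
def Spec_is_run_or_triplet (card : List Int) (out : Bool) : Prop := out = is_run_or_triplet_alt card
instance (card : List Int) (out : Bool) : Decidable (Spec_is_run_or_triplet card out) := by unfold Spec_is_run_or_triplet; infer_instance

-- ===== CLAIM (what is proved, stated in full; the proofs are below) =====
def Claim_equal_is_run_or_triplet : Prop := ∀ (card : List Int), Dom_is_run_or_triplet card → Spec_is_run_or_triplet card (is_run_or_triplet card)

-- ===== LEMMAS AND PROOFS =====

theorem pvBodyA_iff (a b c : Int) :
    pvBodyA a b c = true ↔ (a = b ∧ b = c) ∨ ∃ x : Int, [x, x + 1, x + 2].Perm [a, b, c] := by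
  unfold pvBodyA
  by_cases h : a = b ∧ b = c
  · rw [if_pos (by simp [h.1, h.2])]
    simp [h]
  · rw [if_neg (by simpa using h)]
    dsimp only
    constructor
    · intro hd
      rw [decide_eq_true_eq] at hd
      have hperm := PySem.List.sorted_perm [a, b, c] (fun x => x) false
      have hlen : (PySem.List.sorted [a, b, c] (fun x => x) false).length = 3 :=
        PySem.List.length_sorted [a, b, c] (fun x => x) false
      obtain ⟨p, q, r, hs⟩ : ∃ p q r, PySem.List.sorted [a, b, c] (fun x => x) false = [p, q, r] := by
        match hsc : PySem.List.sorted [a, b, c] (fun x => x) false, hlen with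
        | [p, q, r], _ => exact ⟨p, q, r, rfl⟩
      rw [hs] at hd hperm
      simp only [PySem.List.pyGetD] at hd
      obtain ⟨h1, h2⟩ := hd
      refine Or.inr ⟨p, ?_⟩
      have hq : q = p + 1 := by
        simp at h1 h2
        omega
      have hr : r = p + 2 := by
        simp at h1 h2
        omega
      rw [hq, hr] at hperm
      exact hperm
    · rintro (⟨h1, h2⟩ | ⟨x, hx⟩)
      · exact absurd ⟨h1, h2⟩ h
      · have hsor : PySem.List.sorted [a, b, c] (fun x => x) = [x, x + 1, x + 2] :=
          PySem.List.sorted_eq_of_perm_of_pairwise_lt _ _ _ hx (by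
            simp [List.pairwise_cons])
        rw [show PySem.List.sorted [a, b, c] (fun x => x) false = PySem.List.sorted [a, b, c] (fun x => x) from rfl]
        rw [hsor]
        simp [PySem.List.pyGetD]
        omega

theorem triple_sublist_iff (l : List Int) (a b c : Int) :
    (∃ i j k : ℕ, i < j ∧ j < k ∧ l[i]? = some a ∧ l[j]? = some b ∧ l[k]? = some c) ↔
      List.Sublist [a, b, c] l := by
  constructor
  · rintro ⟨i, j, k, hij, hjk, ha, hb, hc⟩
    have hk : k < l.length := (List.getElem?_eq_some_iff.mp hc).1
    have hmono : StrictMono (fun n => match n with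
      | 0 => i | 1 => j | 2 => k | m + 3 => l.length + m + 3) := by
      apply strictMono_nat_of_lt_succ
      intro n
      match n with
      | 0 => exact hij
      | 1 => exact hjk
      | 2 => show k < l.length + 0 + 3; omega
      | m + 3 => show l.length + m + 3 < l.length + (m + 1) + 3; omega
    apply List.sublist_of_orderEmbedding_getElem?_eq (OrderEmbedding.ofStrictMono _ hmono)
    intro ix
    match ix with
    | 0 => simpa using ha.symm
    | 1 => simpa using hb.symm
    | 2 => simpa using hc.symm
    | m + 3 =>
      simp only [OrderEmbedding.coe_ofStrictMono]
      show ([a, b, c][m + 3]? : Option Int) = l[l.length + m + 3]?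
      rw [List.getElem?_eq_none (by simp), List.getElem?_eq_none (by omega)]
  · intro hs
    obtain ⟨f, hf⟩ := List.sublist_iff_exists_orderEmbedding_getElem?_eq.mp hs
    refine ⟨f 0, f 1, f 2, f.strictMono (by omega), f.strictMono (by omega), ?_, ?_, ?_⟩
    · simpa using (hf 0).symm
    · simpa using (hf 1).symm
    · simpa using (hf 2).symm

theorem run_iff (l : List Int) (x : Int) :
    (∃ i j k : ℕ, i < j ∧ j < k ∧ l[i]? = some x ∧ l[j]? = some x ∧ l[k]? = some x) ↔
      3 ≤ l.count x := by
  rw [triple_sublist_iff, show [x, x, x] = List.replicate 3 x from rfl,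
    List.replicate_sublist_iff]

theorem A_true_of (l : List Int) (i j k : ℕ) (hij : i < j) (hjk : j < k)
    (hk : k < l.length)
    (hb : pvBodyA (l.getD i 0) (l.getD j 0) (l.getD k 0) = true) :
    is_run_or_triplet l = true := by
  unfold is_run_or_triplet
  simp only [List.any_eq_true]
  refine ⟨(i : Int), PySem.List.mem_pyRange_one.mpr ⟨by omega, by omega⟩,
          (j : Int), PySem.List.mem_pyRange_one.mpr ⟨by omega, by omega⟩,
          (k : Int), PySem.List.mem_pyRange_one.mpr ⟨by omega, by omega⟩, ?_⟩
  rw [PySem.List.pyGetD_natCast, PySem.List.pyGetD_natCast, PySem.List.pyGetD_natCast]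
  exact hb

theorem exists_sorted_of_distinct (i j k : ℕ) (h1 : i ≠ j) (h2 : i ≠ k) (h3 : j ≠ k) :
    ∃ a b c : ℕ, a < b ∧ b < c ∧ [a, b, c].Perm [i, j, k] := by
  rcases Nat.lt_trichotomy i j with hij | hij | hij
  · rcases Nat.lt_trichotomy j k with hjk | hjk | hjk
    · exact ⟨i, j, k, hij, hjk, List.Perm.refl _⟩
    · exact absurd hjk h3
    · rcases Nat.lt_trichotomy i k with hik | hik | hik
      · exact ⟨i, k, j, hik, hjk, .cons i (.swap j k [])⟩
      · exact absurd hik h2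
      · exact ⟨k, i, j, hik, hij, ((List.Perm.swap i k [j]).trans (.cons i (.swap j k [])))⟩
  · exact absurd hij h1
  · rcases Nat.lt_trichotomy i k with hik | hik | hik
    · exact ⟨j, i, k, hij, hik, .swap i j [k]⟩
    · exact absurd hik h2
    · rcases Nat.lt_trichotomy j k with hjk | hjk | hjk
      · exact ⟨j, k, i, hjk, hik, ((List.Perm.cons j (.swap i k [])).trans (.swap i j [k]))⟩
      · exact absurd hjk h3
      · exact ⟨k, j, i, hjk, hij, ((List.Perm.swap j k [i]).trans ((List.Perm.cons j (.swap i k [])).trans (.swap i j [k])))⟩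

theorem A_iff (l : List Int) :
    is_run_or_triplet l = true ↔
      (∃ x : Int, 3 ≤ l.count x) ∨ (∃ x : Int, x ∈ l ∧ x + 1 ∈ l ∧ x + 2 ∈ l) := by
  constructor
  · intro h
    unfold is_run_or_triplet at h
    simp only [List.any_eq_true] at h
    obtain ⟨i, hi, j, hj, k, hk, hb⟩ := h
    rw [PySem.List.mem_pyRange_one] at hi hj hk
    have hi0 : 0 ≤ i := hi.1
    have hj0 : 0 ≤ j := by omega
    have hk0 : 0 ≤ k := by omega
    rw [PySem.List.pyGetD_eq_getElem l 0 hi0 hi.2, PySem.List.pyGetD_eq_getElem l 0 hj0 hj.2,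
      PySem.List.pyGetD_eq_getElem l 0 hk0 hk.2] at hb
    have hilt : i.toNat < l.length := by omega
    have hjlt : j.toNat < l.length := by omega
    have hklt : k.toNat < l.length := by omega
    have hsub : ∀ y ∈ [l[i.toNat], l[j.toNat], l[k.toNat]], y ∈ l := by
      intro y hy
      simp only [List.mem_cons, List.not_mem_nil, or_false] at hy
      rcases hy with rfl | rfl | rfl <;> exact List.getElem_mem _
    rcases (pvBodyA_iff _ _ _).mp hb with ⟨h1, h2⟩ | ⟨x, hperm⟩
    · refine Or.inl ⟨l[i.toNat], (run_iff l _).mp ⟨i.toNat, j.toNat, k.toNat, by omega, by omega, ?_, ?_, ?_⟩⟩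
      · exact List.getElem?_eq_getElem hilt
      · rw [List.getElem?_eq_getElem hjlt, ← h1]
      · rw [List.getElem?_eq_getElem hklt, ← h2, ← h1]
    · refine Or.inr ⟨x, ?_, ?_, ?_⟩
      · exact hsub x (hperm.subset (by simp))
      · exact hsub (x + 1) (hperm.subset (by simp))
      · exact hsub (x + 2) (hperm.subset (by simp))
  · rintro (⟨x, hx⟩ | ⟨x, h1, h2, h3⟩)
    · obtain ⟨i, j, k, hij, hjk, ha, hb, hc⟩ := (run_iff l x).mpr hx
      have hk : k < l.length := (List.getElem?_eq_some_iff.mp hc).1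
      apply A_true_of l i j k hij hjk hk
      have gi : l.getD i 0 = x := by rw [List.getD_eq_getElem?_getD, ha]; rfl
      have gj : l.getD j 0 = x := by rw [List.getD_eq_getElem?_getD, hb]; rfl
      have gk : l.getD k 0 = x := by rw [List.getD_eq_getElem?_getD, hc]; rfl
      rw [gi, gj, gk]
      simp [pvBodyA]
    · obtain ⟨i₀, hi₀, vi⟩ := List.getElem_of_mem h1
      obtain ⟨j₀, hj₀, vj⟩ := List.getElem_of_mem h2
      obtain ⟨k₀, hk₀, vk⟩ := List.getElem_of_mem h3
      have d1 : i₀ ≠ j₀ := by rintro rfl; rw [vi] at vj; omega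
      have d2 : i₀ ≠ k₀ := by rintro rfl; rw [vi] at vk; omega
      have d3 : j₀ ≠ k₀ := by rintro rfl; rw [vj] at vk; omega
      obtain ⟨a, b, c, hab, hbc, hperm⟩ := exists_sorted_of_distinct i₀ j₀ k₀ d1 d2 d3
      have hmemc : c < l.length := by
        have hcm : c ∈ [i₀, j₀, k₀] := hperm.subset (by simp)
        simp only [List.mem_cons, List.not_mem_nil, or_false] at hcm
        rcases hcm with rfl | rfl | rfl <;> omega
      apply A_true_of l a b c hab hbc hmemc
      apply (pvBodyA_iff _ _ _).mpr
      refine Or.inr ⟨x, ?_⟩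
      have hmap : [i₀, j₀, k₀].map (fun n => l.getD n 0) = [x, x + 1, x + 2] := by
        simp only [List.map_cons, List.map_nil]
        rw [List.getD_eq_getElem l 0 hi₀, List.getD_eq_getElem l 0 hj₀,
          List.getD_eq_getElem l 0 hk₀, vi, vj, vk]
      have hpm := (hperm.map (fun n => l.getD n 0))
      rw [hmap] at hpm
      exact hpm.symm

theorem alt_iff (l : List Int) :
    is_run_or_triplet_alt l = true ↔
      (∃ x : Int, 3 ≤ l.count x) ∨ (∃ x : Int, x ∈ l ∧ x + 1 ∈ l ∧ x + 2 ∈ l) := by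
  unfold is_run_or_triplet_alt
  dsimp only
  rw [show (List.foldl (fun d x => d.insert x (d.getD x 0 + 1)) (PySem.Dict.empty : PySem.Dict Int Int) l) = PySem.Dict.counter l from PySem.Dict.foldl_insert_getD_add_one_eq_counter l]
  have hv : (PySem.Dict.counter l).values = (PySem.Set.ofList l).map (fun k => ((l.count k : Int))) := by
    simp [PySem.Dict.values, PySem.Dict.items_counter]
  rw [hv, PySem.Dict.keys_counter]
  by_cases h : ((PySem.Set.ofList l).map (fun k => ((l.count k : Int)))).any (fun c => decide (3 ≤ c)) = true
  · rw [if_pos h]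
    simp only [List.any_map, List.any_eq_true, Function.comp, decide_eq_true_eq,
      PySem.Set.mem_ofList] at h
    obtain ⟨x, hx, hc⟩ := h
    have h3 : 3 ≤ l.count x := by exact_mod_cast hc
    simp only [true_iff]
    exact Or.inl ⟨x, h3⟩
  · rw [if_neg h]
    simp only [List.any_map, List.any_eq_true, Function.comp, decide_eq_true_eq,
      PySem.Set.mem_ofList, not_exists, not_and] at h
    push Not at h
    constructor
    · intro hb
      simp only [List.any_eq_true, Bool.and_eq_true, PySem.Set.mem_ofList,
        PySem.Dict.contains_counter, List.contains_eq_mem, decide_eq_true_eq] at hb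
      obtain ⟨x, hx, h1, h2⟩ := hb
      exact Or.inr ⟨x, hx, h1, h2⟩
    · rintro (⟨x, hx⟩ | ⟨x, hx, h1, h2⟩)
      · exact absurd hx (by have := h x (List.count_pos_iff.mp (by omega)); omega)
      · simp only [List.any_eq_true, Bool.and_eq_true, PySem.Set.mem_ofList,
          PySem.Dict.contains_counter, List.contains_eq_mem, decide_eq_true_eq]
        exact ⟨x, hx, h1, h2⟩

-- ===== VERDICT (by name: the statement is the Claim_ definition above) =====
theorem is_run_or_triplet_spec : Claim_equal_is_run_or_triplet := by
  intro card _
  unfold Spec_is_run_or_triplet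
  have h := (A_iff card).trans (alt_iff card).symm
  exact Bool.coe_iff_coe.mp h
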